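-- pv_equiv track=rewrite | github.com/dyingc/angr_ctf | 01_angr_avoid/generate.py | check_string_recursive
-- ===== SOURCE A (Python) =====
-- def check_string_recursive(array0, array1, random_list, bit):
--   # 这个函数递归地构建 C 语言代码，用于比较两个数组（或字符串）的特定位。
--   # 它的目的是在生成的二进制文件中创建复杂的条件跳转逻辑，
--   # 使得 Angr 在探索路径时，如果选择了错误的位比较结果，就会进入 `avoid_me()` 函数，
--   # 从而引导 Angr 避开这些“坏”路径。
--
--   # array0 和 array1: 代表在 C 代码中要比较的两个变量名（例如 'buffer' 和 'password'）。
--   # random_list: 一个布尔值列表，决定了在当前位比较中，是期望相等还是不相等。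
--   # bit: 当前正在比较的位索引，从高位向低位递减。
--
--   # 基本情况：如果 bit 小于 0，表示所有位都已比较完毕。
--   # 此时返回 `maybe_good()` 函数的调用，这通常是 Angr 期望找到的“好”路径。
--   if bit < 0:
--     return f'maybe_good({array0}, {array1});'
--   else:
--     # 根据 random_list 的第一个布尔值，决定当前位的比较逻辑。
--     # random_list[0] 为 True 意味着期望 `array0` 和 `array1` 的当前位相等。
--     if random_list[0]:
--       # 如果当前位相等，则递归调用 `check_string_recursive` 处理下一位。
--       # 如果不相等，则插入 `avoid_me()` 调用，引导 Angr 避开此路径。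
--       ret_str = f'if (CHECK_BIT({array0}, {bit}) == CHECK_BIT({array1}, {bit}))' + '{' + check_string_recursive(array0, array1, random_list[1:], bit-1) + '} else { avoid_me(); ' + check_string_recursive(array0, array1, random_list[1:], bit-1) + '}'
--     # random_list[0] 为 False 意味着期望 `array0` 和 `array1` 的当前位不相等。
--     else:
--       # 如果当前位不相等，则插入 `avoid_me()` 调用，引导 Angr 避开此路径。
--       # 如果相等，则递归调用 `check_string_recursive` 处理下一位。
--       ret_str = f'if (CHECK_BIT({array0}, {bit}) != CHECK_BIT({array1}, {bit}))' + '{ avoid_me();' + check_string_recursive(array0, array1, random_list[1:], bit-1) + '} else { ' + check_string_recursive(array0, array1, random_list[1:], bit-1) + '}'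
--     return ret_str
-- ===== SOURCE B (Python) =====
-- def check_string_recursive(array0, array1, random_list, bit):
--     # Iterative bottom-up build: each level's string is computed once and
--     # reused for both branches, instead of A's two identical recursive calls.
--     s = f'maybe_good({array0}, {array1});'
--     for j in range(bit + 1):
--         if random_list[bit - j]:
--             s = f'if (CHECK_BIT({array0}, {j}) == CHECK_BIT({array1}, {j})){{{s}}} else {{ avoid_me(); {s}}}'
--         else:
--             s = f'if (CHECK_BIT({array0}, {j}) != CHECK_BIT({array1}, {j})){{ avoid_me();{s}}} else {{ {s}}}'
--     return s
-- ===== Notes on version B (the rewrite author's own statement) =====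
-- stated objective: alternative
-- what changed: Replaced the doubly-branching recursion (which makes two identical recursive calls at every level) by a single bottom-up loop that builds each level's string once and splices it into both branches.
import Mathlib
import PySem

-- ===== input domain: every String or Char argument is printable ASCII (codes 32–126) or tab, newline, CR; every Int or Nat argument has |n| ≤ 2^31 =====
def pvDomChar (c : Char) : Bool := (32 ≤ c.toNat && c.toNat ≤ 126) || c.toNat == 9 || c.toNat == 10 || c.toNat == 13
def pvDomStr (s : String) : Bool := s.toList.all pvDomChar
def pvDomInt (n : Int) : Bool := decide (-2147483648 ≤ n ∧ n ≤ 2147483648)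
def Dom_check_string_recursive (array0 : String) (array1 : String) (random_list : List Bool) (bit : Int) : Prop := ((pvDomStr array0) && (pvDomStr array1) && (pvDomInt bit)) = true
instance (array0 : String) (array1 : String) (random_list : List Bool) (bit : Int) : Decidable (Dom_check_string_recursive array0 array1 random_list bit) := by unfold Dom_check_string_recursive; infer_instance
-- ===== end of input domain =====

-- B builds each level's string once in a bottom-up loop instead of A's two identical
-- recursive calls per level (alternative decomposition); return values agree on Pre_.

-- ===== PORT A =====
-- literal transliteration of A: recursion on the list, branch order preserved,
-- the recursive call written twice as in the Python source.
def check_string_recursive (array0 : String) (array1 : String) (random_list : List Bool) (bit : Int) : String :=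
  if bit < 0 then
    "maybe_good(" ++ array0 ++ ", " ++ array1 ++ ");"
  else
    match random_list with
    | [] => ""  -- Python raises IndexError on random_list[0] here; excluded by Pre_
    | flag :: rest =>
      if flag then
        "if (CHECK_BIT(" ++ array0 ++ ", " ++ PySem.Int.toStr bit ++ ") == CHECK_BIT(" ++ array1 ++ ", " ++ PySem.Int.toStr bit ++ ")){"
          ++ check_string_recursive array0 array1 rest (bit - 1)
          ++ "} else { avoid_me(); "
          ++ check_string_recursive array0 array1 rest (bit - 1) ++ "}"
      else
        "if (CHECK_BIT(" ++ array0 ++ ", " ++ PySem.Int.toStr bit ++ ") != CHECK_BIT(" ++ array1 ++ ", " ++ PySem.Int.toStr bit ++ ")){ avoid_me();"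
          ++ check_string_recursive array0 array1 rest (bit - 1)
          ++ "} else { "
          ++ check_string_recursive array0 array1 rest (bit - 1) ++ "}"

-- ===== PORT B =====
-- one loop level of Source B: wrap the already-built inner string s for bit index j
def csrWrap (array0 : String) (array1 : String) (flag : Bool) (j : Int) (s : String) : String :=
  if flag then
    "if (CHECK_BIT(" ++ array0 ++ ", " ++ PySem.Int.toStr j ++ ") == CHECK_BIT(" ++ array1 ++ ", " ++ PySem.Int.toStr j ++ ")){"
      ++ s ++ "} else { avoid_me(); " ++ s ++ "}"
  else
    "if (CHECK_BIT(" ++ array0 ++ ", " ++ PySem.Int.toStr j ++ ") != CHECK_BIT(" ++ array1 ++ ", " ++ PySem.Int.toStr j ++ ")){ avoid_me();"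
      ++ s ++ "} else { " ++ s ++ "}"

def check_string_recursive_alt (array0 : String) (array1 : String) (random_list : List Bool) (bit : Int) : String :=
  (PySem.List.pyRange 0 (bit + 1) 1).foldl
    (fun s j =>
      match PySem.List.pyGet? random_list (bit - j) with
      | none => ""  -- Python raises IndexError here; excluded by Pre_
      | some flag => csrWrap array0 array1 flag j s)
    ("maybe_good(" ++ array0 ++ ", " ++ array1 ++ ");")

-- ===== PRECONDITION & SPEC =====
-- A raises IndexError (random_list[0] on an exhausted list) iff the list has at most
-- `bit` elements; Pre_ admits exactly the inputs where A returns.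
def Pre_check_string_recursive (array0 : String) (array1 : String) (random_list : List Bool) (bit : Int) : Prop :=
  bit < (random_list.length : Int)
instance (array0 : String) (array1 : String) (random_list : List Bool) (bit : Int) : Decidable (Pre_check_string_recursive array0 array1 random_list bit) := by unfold Pre_check_string_recursive; infer_instance

def pvWitness_check_string_recursive : String × String × List Bool × Int := ("buf", "pwd", [true, false, true], 2)

def Spec_check_string_recursive (array0 : String) (array1 : String) (random_list : List Bool) (bit : Int) (out : String) : Prop := out = check_string_recursive_alt array0 array1 random_list bit
instance (array0 : String) (array1 : String) (random_list : List Bool) (bit : Int) (out : String) : Decidable (Spec_check_string_recursive array0 array1 random_list bit out) := by unfold Spec_check_string_recursive; infer_instance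

-- ===== CLAIM (what is proved, stated in full; the proofs are below) =====
def Claim_equal_check_string_recursive : Prop := ∀ (array0 : String) (array1 : String) (random_list : List Bool) (bit : Int), Dom_check_string_recursive array0 array1 random_list bit → Pre_check_string_recursive array0 array1 random_list bit → Spec_check_string_recursive array0 array1 random_list bit (check_string_recursive array0 array1 random_list bit)

-- ===== LEMMAS AND PROOFS =====

-- indexing into a cons with a positive index skips the head
theorem csr_pyGet?_cons_pos {α : Type} (x : α) (xs : List α) (i : Int) (h : 1 ≤ i) :
    PySem.List.pyGet? (x :: xs) i = PySem.List.pyGet? xs (i - 1) := by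
  rw [PySem.List.pyGet?_of_nonneg (x :: xs) (by omega), PySem.List.pyGet?_of_nonneg xs (by omega)]
  have : i.toNat = (i - 1).toNat + 1 := by omega
  rw [this]
  simp

theorem csr_alt_neg (array0 array1 : String) (rl : List Bool) (bit : Int) (h : bit < 0) :
    check_string_recursive_alt array0 array1 rl bit
      = "maybe_good(" ++ array0 ++ ", " ++ array1 ++ ");" := by
  unfold check_string_recursive_alt
  rw [PySem.List.pyRange_one_eq_nil (by omega)]
  rfl

-- peel the top level off B's loop: the last iteration (j = bit) consumes the list head,
-- and the earlier iterations compute exactly B on the tail with bit - 1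
theorem csr_alt_cons (array0 array1 : String) (flag : Bool) (rest : List Bool) (bit : Int)
    (hb : 0 ≤ bit) :
    check_string_recursive_alt array0 array1 (flag :: rest) bit
      = csrWrap array0 array1 flag bit (check_string_recursive_alt array0 array1 rest (bit - 1)) := by
  unfold check_string_recursive_alt
  rw [PySem.List.pyRange_one_succ_right (by omega)]
  rw [List.foldl_append]
  simp only [List.foldl_cons, List.foldl_nil, sub_self, PySem.List.pyGet?_zero_cons]
  congr 1
  rw [show bit - 1 + 1 = bit from by ring]
  apply PySem.List.foldl_congr_mem
  intro s j hj
  rcases (PySem.List.mem_pyRange_one).mp hj with ⟨h0, h1⟩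
  rw [csr_pyGet?_cons_pos _ _ _ (by omega)]
  rw [show bit - j - 1 = bit - 1 - j from by ring]

theorem csr_main (array0 array1 : String) (rl : List Bool) :
    ∀ bit : Int, bit < (rl.length : Int) →
      check_string_recursive array0 array1 rl bit = check_string_recursive_alt array0 array1 rl bit := by
  induction rl with
  | nil =>
    intro bit h
    simp only [List.length_nil, Int.natCast_zero] at h
    rw [csr_alt_neg _ _ _ _ h]
    unfold check_string_recursive
    rw [if_pos h]
  | cons flag rest ih =>
    intro bit h
    by_cases hneg : bit < 0
    · rw [csr_alt_neg _ _ _ _ hneg]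
      unfold check_string_recursive
      rw [if_pos hneg]
    · rw [not_lt] at hneg
      have hrec := ih (bit - 1) (by simp at h ⊢; omega)
      rw [csr_alt_cons _ _ _ _ _ hneg]
      unfold check_string_recursive
      rw [if_neg (by omega)]
      unfold csrWrap
      by_cases hf : flag
      · subst hf; simp only [if_pos]; rw [hrec]
      · simp only [Bool.not_eq_true] at hf; subst hf; simp only [Bool.false_eq_true, ite_false]; rw [hrec]

-- ===== VERDICT (by name: the statement is the Claim_ definition above) =====
theorem check_string_recursive_spec : Claim_equal_check_string_recursive := by
  intro array0 array1 random_list bit _ hpre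
  unfold Spec_check_string_recursive
  exact csr_main array0 array1 random_list bit hpre
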